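-- pv_equiv track=rewrite | github.com/namitharayasam/pibt_lacam | multiagent_trial.py | extract_clean_solutions
-- ===== SOURCE A (Python) =====
-- from typing import List, Tuple, Set, Dict, Optional
--
-- Vertex = Tuple[int, int]
--
-- def extract_clean_solutions(solution: List[List[Vertex]]) -> List[List[Vertex]]:
--     clean_solutions = []
--
--     for agent_id in range(len(solution)):
--         messy_path = solution[agent_id]
--         clean = []
--         visited_positions = {}
--
--         for loc in messy_path:
--             if loc in visited_positions:
--                 backtrack_idx = visited_positions[loc]
--                 clean = clean[:backtrack_idx + 1]
--             else:
--                 clean.append(loc)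
--                 visited_positions[loc] = len(clean) - 1
--
--         clean_solutions.append(clean)
--
--     return clean_solutions
-- ===== SOURCE B (Python) =====
-- def _clean_path(path):
--     # pass 1: simulate only the clean length over the path; record append events
--     first_idx = {}
--     n = 0
--     events = []
--     for loc in path:
--         j = first_idx.get(loc)
--         if j is None:
--             first_idx[loc] = n
--             events.append((n, loc))
--             n += 1
--         else:
--             n = min(n, j + 1)
--     # pass 2: slot i of the result is the LAST event that wrote slot i;
--     # found by one reverse scan (keep-first while scanning backwards)
--     slot = {}
--     for i, loc in reversed(events):
--         if i not in slot:
--             slot[i] = loc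
--     return [slot[i] for i in range(n)]
--
--
-- def extract_clean_solutions(solution):
--     return [_clean_path(path) for path in solution]
-- ===== Notes on version B (the rewrite author's own statement) =====
-- stated objective: alternative
-- what changed: Replaces A's online list maintenance (append / slice-truncate on every revisit) by two staged passes: pass 1 simulates only the clean length as an integer and records append events, pass 2 reconstructs the result by a single reverse scan taking the last write per slot; no intermediate list is ever sliced or copied (O(n) worst case per path vs A's O(n^2)).
import Mathlib
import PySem

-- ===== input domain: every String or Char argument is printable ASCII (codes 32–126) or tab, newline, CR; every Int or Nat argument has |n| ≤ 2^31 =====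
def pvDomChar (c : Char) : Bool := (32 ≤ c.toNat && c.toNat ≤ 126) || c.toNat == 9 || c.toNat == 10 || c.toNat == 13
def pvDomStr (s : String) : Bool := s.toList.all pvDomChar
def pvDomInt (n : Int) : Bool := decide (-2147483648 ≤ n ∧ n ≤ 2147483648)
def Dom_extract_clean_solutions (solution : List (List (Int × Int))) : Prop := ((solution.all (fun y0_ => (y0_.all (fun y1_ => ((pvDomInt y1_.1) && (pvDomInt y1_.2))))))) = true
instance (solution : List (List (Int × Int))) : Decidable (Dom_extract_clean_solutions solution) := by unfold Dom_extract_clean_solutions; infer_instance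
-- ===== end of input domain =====

-- B replaces A's online list maintenance (append / slice on revisit) by two staged
-- passes: an integer-only length simulation recording append events, then a reverse
-- scan reconstructing the result (last write per slot); same return value.

-- ===== PORT A =====
-- inner loop of A over one messy path: state = (clean, visited_positions)
def pvStepA (st : List (Int × Int) × PySem.Dict (Int × Int) Int) (loc : Int × Int) :
    List (Int × Int) × PySem.Dict (Int × Int) Int :=
  match st.2.get? loc with
  | some backtrack_idx => (PySem.List.slice st.1 none (some (backtrack_idx + 1)), st.2)
  | none =>
      let clean := st.1 ++ [loc]
      (clean, st.2.insert loc ((clean.length : Int) - 1))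

def extract_clean_solutions (solution : List (List (Int × Int))) : List (List (Int × Int)) :=
  -- for agent_id in range(len(solution)): the index is always in range, so getD's default is never used
  (List.range solution.length).foldl
    (fun clean_solutions agent_id =>
      let messy_path := solution.getD agent_id []
      clean_solutions ++ [(messy_path.foldl pvStepA ([], PySem.Dict.empty)).1])
    []

-- ===== PORT B =====
-- pass 1 of B: state = (first_idx, n, events)
def pvStep1 (st : PySem.Dict (Int × Int) Int × Int × List (Int × (Int × Int))) (loc : Int × Int) :
    PySem.Dict (Int × Int) Int × Int × List (Int × (Int × Int)) :=
  match st.1.get? loc with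
  | none => (st.1.insert loc st.2.1, st.2.1 + 1, st.2.2 ++ [(st.2.1, loc)])
  | some j => (st.1, min st.2.1 (j + 1), st.2.2)

-- pass 2 of B: keep-first over the reversed event list
def pvFillSlots (events : List (Int × (Int × Int))) : PySem.Dict Int (Int × Int) :=
  events.reverse.foldl
    (fun slot e => if slot.contains e.1 then slot else slot.insert e.1 e.2)
    PySem.Dict.empty

def pvCleanPath (path : List (Int × Int)) : List (Int × Int) :=
  let st := path.foldl pvStep1 (PySem.Dict.empty, 0, [])
  let slot := pvFillSlots st.2.2
  -- slot[i]: the KeyError branch is unreachable — every slot 0 ≤ i < n has a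
  -- recorded event (proved below), so get?.getD with a dummy default is exact
  (PySem.List.pyRange 0 st.2.1 1).map (fun i => (slot.get? i).getD (0, 0))

def extract_clean_solutions_alt (solution : List (List (Int × Int))) : List (List (Int × Int)) :=
  solution.map pvCleanPath

-- ===== PRECONDITION & SPEC =====
def Spec_extract_clean_solutions (solution : List (List (Int × Int))) (out : List (List (Int × Int))) : Prop := out = extract_clean_solutions_alt solution
instance (solution : List (List (Int × Int))) (out : List (List (Int × Int))) : Decidable (Spec_extract_clean_solutions solution out) := by unfold Spec_extract_clean_solutions; infer_instance

-- ===== CLAIM (what is proved, stated in full; the proofs are below) =====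
def Claim_equal_extract_clean_solutions : Prop := ∀ (solution : List (List (Int × Int))), Dom_extract_clean_solutions solution → Spec_extract_clean_solutions solution (extract_clean_solutions solution)

-- ===== LEMMAS AND PROOFS =====

-- last write to slot i in the event list (what pass 2 computes per slot)
def pvLW (events : List (Int × (Int × Int))) (i : Int) : Option (Int × Int) :=
  (events.reverse.find? (fun e => e.1 == i)).map Prod.snd

lemma pvFill_get_aux (l : List (Int × (Int × Int))) (d : PySem.Dict Int (Int × Int)) (i : Int) :
    (l.foldl (fun slot e => if slot.contains e.1 then slot else slot.insert e.1 e.2) d).get? i =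
      match d.get? i with
      | some v => some v
      | none => (l.find? (fun e => e.1 == i)).map Prod.snd := by
  induction l generalizing d with
  | nil => cases h : d.get? i <;> simp [h]
  | cons e l ih =>
      simp only [List.foldl_cons]
      by_cases hc : d.contains e.1 = true
      · rw [if_pos hc, ih]
        by_cases he : e.1 = i
        · have hs : (d.get? i).isSome := by
            rw [← he, ← PySem.Dict.contains_eq_isSome_get?]; exact hc
          obtain ⟨v, hv⟩ := Option.isSome_iff_exists.mp hs
          simp [hv]
        · have hbe : (e.1 == i) = false := by simpa using he
          cases h : d.get? i <;> simp [List.find?, hbe]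
      · rw [if_neg hc]
        by_cases he : e.1 = i
        · have h : d.get? i = none := by
            rw [← he, PySem.Dict.get?_eq_none_iff_contains]; simpa using hc
          rw [ih]
          simp [he, h, PySem.Dict.get?_insert_self, List.find?]
        · rw [ih, PySem.Dict.get?_insert_of_ne _ _ (Ne.symm he)]
          have hbe : (e.1 == i) = false := by simpa using he
          cases h : d.get? i <;> simp [List.find?, hbe]

lemma pvFill_get (events : List (Int × (Int × Int))) (i : Int) :
    (pvFillSlots events).get? i = pvLW events i := by
  unfold pvFillSlots pvLW
  rw [pvFill_get_aux]
  simp [PySem.Dict.get?_empty]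

-- coupling invariant between A's inner state and B's pass-1 state
def pvInv (sa : List (Int × Int) × PySem.Dict (Int × Int) Int)
    (sb : PySem.Dict (Int × Int) Int × Int × List (Int × (Int × Int))) : Prop :=
  sa.2 = sb.1 ∧ sb.2.1 = (sa.1.length : Int) ∧
    (∀ i : Nat, i < sa.1.length → pvLW sb.2.2 (i : Int) = sa.1[i]?) ∧
    (∀ k j, sb.1.get? k = some j → 0 ≤ j)

lemma pvLW_append (events : List (Int × (Int × Int))) (n : Int) (loc : Int × Int) (i : Int) :
    pvLW (events ++ [(n, loc)]) i = if n = i then some loc else pvLW events i := by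
  unfold pvLW
  rw [List.reverse_append]
  by_cases h : n = i <;> simp [h]

lemma pvInv_step (sa : List (Int × Int) × PySem.Dict (Int × Int) Int)
    (sb : PySem.Dict (Int × Int) Int × Int × List (Int × (Int × Int)))
    (loc : Int × Int) (h : pvInv sa sb) : pvInv (pvStepA sa loc) (pvStep1 sb loc) := by
  obtain ⟨hd, hn, hlw, hpos⟩ := h
  obtain ⟨clean, da⟩ := sa
  obtain ⟨db, n, events⟩ := sb
  simp only at hd hn hlw hpos
  subst hd
  unfold pvStepA pvStep1
  cases hget : da.get? loc with
  | some j =>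
      have hj : 0 ≤ j := hpos loc j hget
      have hsl : PySem.List.slice clean none (some (j + 1)) = clean.take (j + 1).toNat :=
        PySem.List.slice_to clean (show (0:Int) ≤ j + 1 by omega)
      refine ⟨rfl, ?_, ?_, hpos⟩
      · simp only
        rw [hsl, List.length_take]
        omega
      · intro i hi
        simp only [hsl] at hi ⊢
        rw [List.length_take] at hi
        rw [List.getElem?_take, if_pos (by omega)]
        exact hlw i (by omega)
  | none =>
      refine ⟨?_, ?_, ?_, ?_⟩
      · simp only
        congr 1
        simp [hn]
      · simp only [List.length_append, List.length_singleton]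
        omega
      · intro i hi
        simp only at hi ⊢
        rw [pvLW_append]
        simp only [List.length_append, List.length_singleton] at hi
        by_cases he : i = clean.length
        · subst he
          rw [if_pos (by omega), List.getElem?_append_right (le_refl _)]
          simp
        · rw [if_neg (by omega), List.getElem?_append_left (by omega)]
          exact hlw i (by omega)
      · intro k j hk
        simp only at hk
        by_cases hkl : k = loc
        · subst hkl
          rw [PySem.Dict.get?_insert_self] at hk
          injection hk with hk
          omega
        · rw [PySem.Dict.get?_insert_of_ne _ _ hkl] at hk
          exact hpos k j hk

lemma pvClean_eq (path : List (Int × Int)) :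
    (path.foldl pvStepA ([], PySem.Dict.empty)).1 = pvCleanPath path := by
  have key : ∀ (p : List (Int × Int)) sa sb, pvInv sa sb →
      pvInv (p.foldl pvStepA sa) (p.foldl pvStep1 sb) := by
    intro p
    induction p with
    | nil => intro sa sb h; exact h
    | cons x xs ih => intro sa sb h; exact ih _ _ (pvInv_step sa sb x h)
  have h0 : pvInv ([], PySem.Dict.empty) (PySem.Dict.empty, 0, []) := by
    refine ⟨rfl, rfl, by intro i hi; simp at hi, ?_⟩
    intro k j hk
    simp [PySem.Dict.get?_empty] at hk
  obtain ⟨_, hn, hlw, _⟩ := key path _ _ h0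
  set st := path.foldl pvStep1 (PySem.Dict.empty, 0, [])
  set clean := (path.foldl pvStepA ([], PySem.Dict.empty)).1
  unfold pvCleanPath
  simp only
  rw [hn, PySem.List.pyRange_one]
  apply List.ext_getElem
  · simp
  · intro i h1 h2
    simp only at h1
    have h1' : i < clean.length := by omega
    simp only [List.getElem_map, List.getElem_range]
    rw [pvFill_get]
    have := hlw i h1'
    rw [show ((0 : Int) + (i : Int)) = (i : Int) by omega, this,
      List.getElem?_eq_getElem h1']
    rfl

lemma pvOuter_map {α β : Type} (l : List α) (d : α) (f : α → β) :
    (List.range l.length).foldl (fun acc i => acc ++ [f (l.getD i d)]) [] = l.map f := by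
  rw [PySem.List.foldl_append_singleton_eq_map]
  apply List.ext_getElem
  · simp
  · intro i h1 h2
    simp [List.getD_eq_getElem?_getD, List.getElem?_eq_getElem (by simpa using h1)]

-- ===== VERDICT (by name: the statement is the Claim_ definition above) =====
theorem extract_clean_solutions_spec : Claim_equal_extract_clean_solutions := by
  intro solution _
  unfold Spec_extract_clean_solutions extract_clean_solutions extract_clean_solutions_alt
  have := pvOuter_map solution ([] : List (Int × Int))
      (fun p => (p.foldl pvStepA ([], PySem.Dict.empty)).1)
  simp only at this ⊢
  rw [this]
  exact List.map_congr_left (fun p _ => pvClean_eq p)
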